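-- pv_equiv track=rewrite | github.com/adpena/molt | experiments/symphony_hotspot/normalize_stripped.py | normalize_issue_stripped
-- ===== SOURCE A (Python) =====
-- def optional_text(value: str) -> str:
--     if value == "":
--         return ""
--     text = value.strip()
--     if text == "":
--         return ""
--     return text
--
-- def normalize_issue_stripped(
--     issue_id: str,
--     identifier: str,
--     title: str,
--     state_name: str,
--     raw_priority: int,
--     label_names: list[str],
--     blocker_ids: list[str],
--     blocker_identifiers: list[str],
--     blocker_states: list[str],
--     description: str,
--     branch_name: str,
--     url: str,
--     created_at: str,
--     updated_at: str,
-- ) -> tuple[str, str, str, str, int, tuple[str, ...], str, str, str, str]: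
--     clean_id = issue_id.strip()
--     clean_identifier = identifier.strip()
--     clean_title = title.strip()
--     clean_state = state_name.strip()
--
--     seen: dict[str, bool] = {}
--     clean_labels: list[str] = []
--     for name in label_names:
--         stripped = name.strip()
--         if stripped == "":
--             continue
--         lowered = stripped.lower()
--         if lowered not in seen:
--             seen[lowered] = True
--             clean_labels.append(lowered)
--     clean_labels.sort()
--
--     return (
--         clean_id,
--         clean_identifier,
--         clean_title,
--         clean_state,
--         raw_priority,
--         tuple(clean_labels),
--         optional_text(description),
--         optional_text(branch_name),
--         optional_text(url),
--         optional_text(created_at),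
--     )
-- ===== SOURCE B (Python) =====
-- def normalize_issue_stripped(
--     issue_id: str,
--     identifier: str,
--     title: str,
--     state_name: str,
--     raw_priority: int,
--     label_names: list[str],
--     blocker_ids: list[str],
--     blocker_identifiers: list[str],
--     blocker_states: list[str],
--     description: str,
--     branch_name: str,
--     url: str,
--     created_at: str,
--     updated_at: str,
-- ) -> tuple[str, str, str, str, int, tuple[str, ...], str, str, str, str]:
--     # sort-then-adjacent-dedup instead of a seen-dict; optional_text is just .strip()
--     cands = [name.strip().lower() for name in label_names if name.strip()]
--     cands.sort()
--     labels: list[str] = []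
--     prev = None
--     for name in cands:
--         if name != prev:
--             labels.append(name)
--             prev = name
--     return (
--         issue_id.strip(),
--         identifier.strip(),
--         title.strip(),
--         state_name.strip(),
--         raw_priority,
--         tuple(labels),
--         description.strip(),
--         branch_name.strip(),
--         url.strip(),
--         created_at.strip(),
--     )
-- ===== Notes on version B (the rewrite author's own statement) =====
-- stated objective: simpler
-- what changed: Labels are deduplicated by sorting first and then one adjacent-dedup pass keeping only the previous value, instead of A's seen-dict membership dedup followed by a sort; optional_text collapses to a plain .strip().
import Mathlib
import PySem

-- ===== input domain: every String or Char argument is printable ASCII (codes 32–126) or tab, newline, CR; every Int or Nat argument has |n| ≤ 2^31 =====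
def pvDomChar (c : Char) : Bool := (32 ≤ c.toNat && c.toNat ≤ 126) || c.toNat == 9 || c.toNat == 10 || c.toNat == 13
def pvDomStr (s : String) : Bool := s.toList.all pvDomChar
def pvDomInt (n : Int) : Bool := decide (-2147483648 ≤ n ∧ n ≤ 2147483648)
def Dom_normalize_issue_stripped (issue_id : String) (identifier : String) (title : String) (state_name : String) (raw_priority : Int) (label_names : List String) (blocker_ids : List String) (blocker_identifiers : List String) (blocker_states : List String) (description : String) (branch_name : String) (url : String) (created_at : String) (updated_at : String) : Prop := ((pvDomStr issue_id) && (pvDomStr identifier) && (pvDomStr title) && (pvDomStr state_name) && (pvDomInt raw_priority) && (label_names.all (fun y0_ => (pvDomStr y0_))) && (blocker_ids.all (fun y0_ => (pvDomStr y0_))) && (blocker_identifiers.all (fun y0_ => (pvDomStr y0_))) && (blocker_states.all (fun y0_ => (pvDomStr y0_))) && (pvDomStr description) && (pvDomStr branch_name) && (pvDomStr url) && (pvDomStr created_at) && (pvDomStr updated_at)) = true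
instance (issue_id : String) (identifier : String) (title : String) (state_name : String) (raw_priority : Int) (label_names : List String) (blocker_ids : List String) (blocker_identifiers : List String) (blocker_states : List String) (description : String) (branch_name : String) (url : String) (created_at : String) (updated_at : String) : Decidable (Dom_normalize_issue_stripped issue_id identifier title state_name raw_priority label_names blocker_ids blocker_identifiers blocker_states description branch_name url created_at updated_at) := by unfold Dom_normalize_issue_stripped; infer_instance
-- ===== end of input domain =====

-- B replaces A's seen-dict dedup-then-sort of labels by sort-then-adjacent-dedup and
-- collapses optional_text to .strip(); objective: simpler.


-- ===== PORT A =====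
def pyOptionalText (value : String) : String :=
  if value = "" then ""
  else
    let text := PySem.Str.strip value
    if text = "" then "" else text

def pySeenStep (st : PySem.Dict String Bool × List String) (name : String) :
    PySem.Dict String Bool × List String :=
  let stripped := PySem.Str.strip name
  if stripped = "" then st
  else
    let lowered := PySem.Str.lower stripped
    if st.1.contains lowered then st
    else (st.1.insert lowered true, st.2 ++ [lowered])

def normalize_issue_stripped (issue_id : String) (identifier : String) (title : String) (state_name : String) (raw_priority : Int) (label_names : List String) (blocker_ids : List String) (blocker_identifiers : List String) (blocker_states : List String) (description : String) (branch_name : String) (url : String) (created_at : String) (updated_at : String) : String × String × String × String × Int × List String × String × String × String × String :=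
  let clean_id := PySem.Str.strip issue_id
  let clean_identifier := PySem.Str.strip identifier
  let clean_title := PySem.Str.strip title
  let clean_state := PySem.Str.strip state_name
  let st := label_names.foldl pySeenStep (PySem.Dict.empty, [])
  let clean_labels := PySem.List.sorted st.2 (fun x => x) false
  (clean_id, clean_identifier, clean_title, clean_state, raw_priority, clean_labels,
   pyOptionalText description, pyOptionalText branch_name, pyOptionalText url,
   pyOptionalText created_at)

-- ===== PORT B =====
def pyAdjStep (st : Option String × List String) (name : String) :
    Option String × List String :=
  if st.1 = some name then st else (some name, st.2 ++ [name])

def normalize_issue_stripped_alt (issue_id : String) (identifier : String) (title : String) (state_name : String) (raw_priority : Int) (label_names : List String) (blocker_ids : List String) (blocker_identifiers : List String) (blocker_states : List String) (description : String) (branch_name : String) (url : String) (created_at : String) (updated_at : String) : String × String × String × String × Int × List String × String × String × String × String :=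
  let cands := label_names.filterMap (fun name =>
    if PySem.Str.strip name = "" then none
    else some (PySem.Str.lower (PySem.Str.strip name)))
  let sortedCands := PySem.List.sorted cands (fun x => x) false
  let st := sortedCands.foldl pyAdjStep (none, [])
  (PySem.Str.strip issue_id, PySem.Str.strip identifier, PySem.Str.strip title,
   PySem.Str.strip state_name, raw_priority, st.2,
   PySem.Str.strip description, PySem.Str.strip branch_name, PySem.Str.strip url,
   PySem.Str.strip created_at)

-- DecidableEq of the 10-tuple result type, chained by hand (plain instance search exceeds its size limit here)
def pvDecEqOut : DecidableEq (String × String × String × String × Int × List String × String × String × String × String) :=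
  have d2 : DecidableEq (String × String) := instDecidableEqProd
  have d3 : DecidableEq (String × String × String) := @instDecidableEqProd _ _ _ d2
  have d4 : DecidableEq (String × String × String × String) := @instDecidableEqProd _ _ _ d3
  have d5 : DecidableEq (List String × String × String × String × String) := @instDecidableEqProd _ _ _ d4
  have d6 : DecidableEq (Int × List String × String × String × String × String) := @instDecidableEqProd _ _ _ d5
  have d7 : DecidableEq (String × Int × List String × String × String × String × String) := @instDecidableEqProd _ _ _ d6
  have d8 : DecidableEq (String × String × Int × List String × String × String × String × String) := @instDecidableEqProd _ _ _ d7
  have d9 : DecidableEq (String × String × String × Int × List String × String × String × String × String) := @instDecidableEqProd _ _ _ d8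
  @instDecidableEqProd _ _ _ d9

-- ===== PRECONDITION & SPEC =====
def Spec_normalize_issue_stripped (issue_id : String) (identifier : String) (title : String) (state_name : String) (raw_priority : Int) (label_names : List String) (blocker_ids : List String) (blocker_identifiers : List String) (blocker_states : List String) (description : String) (branch_name : String) (url : String) (created_at : String) (updated_at : String) (out : String × String × String × String × Int × List String × String × String × String × String) : Prop := out = normalize_issue_stripped_alt issue_id identifier title state_name raw_priority label_names blocker_ids blocker_identifiers blocker_states description branch_name url created_at updated_at
instance (issue_id : String) (identifier : String) (title : String) (state_name : String) (raw_priority : Int) (label_names : List String) (blocker_ids : List String) (blocker_identifiers : List String) (blocker_states : List String) (description : String) (branch_name : String) (url : String) (created_at : String) (updated_at : String) (out : String × String × String × String × Int × List String × String × String × String × String) : Decidable (Spec_normalize_issue_stripped issue_id identifier title state_name raw_priority label_names blocker_ids blocker_identifiers blocker_states description branch_name url created_at updated_at out) := by unfold Spec_normalize_issue_stripped; exact pvDecEqOut _ _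

-- ===== CLAIM (what is proved, stated in full; the proofs are below) =====
def Claim_equal_normalize_issue_stripped : Prop := ∀ (issue_id : String) (identifier : String) (title : String) (state_name : String) (raw_priority : Int) (label_names : List String) (blocker_ids : List String) (blocker_identifiers : List String) (blocker_states : List String) (description : String) (branch_name : String) (url : String) (created_at : String) (updated_at : String), Dom_normalize_issue_stripped issue_id identifier title state_name raw_priority label_names blocker_ids blocker_identifiers blocker_states description branch_name url created_at updated_at → Spec_normalize_issue_stripped issue_id identifier title state_name raw_priority label_names blocker_ids blocker_identifiers blocker_states description branch_name url created_at updated_at (normalize_issue_stripped issue_id identifier title state_name raw_priority label_names blocker_ids blocker_identifiers blocker_states description branch_name url created_at updated_at)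

-- ===== LEMMAS AND PROOFS =====
-- optional_text(v) is just v.strip()
lemma pyOptionalText_eq_strip (v : String) : pyOptionalText v = PySem.Str.strip v := by
  by_cases h1 : v = ""
  · subst h1; decide
  · simp only [pyOptionalText, if_neg h1]
    by_cases h2 : PySem.Str.strip v = ""
    · simp [h2]
    · simp [h2]

-- proof-side recursive form of B's adjacent-dedup loop
def adjGo : Option String → List String → List String
  | _, [] => []
  | prev, x :: xs => if prev = some x then adjGo prev xs else x :: adjGo (some x) xs

lemma foldl_adjStep (l : List String) (prev : Option String) (acc : List String) :
    (l.foldl pyAdjStep (prev, acc)).2 = acc ++ adjGo prev l := by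
  induction l generalizing prev acc with
  | nil => simp [adjGo]
  | cons x xs ih =>
      by_cases h : prev = some x
      · simp [List.foldl_cons, pyAdjStep, adjGo, h, ih]
      · simp [List.foldl_cons, pyAdjStep, adjGo, h, ih]

lemma mem_adjGo (l : List String) (prev : Option String)
    (hchain : l.Pairwise (· ≤ ·))
    (hprev : ∀ p, prev = some p → ∀ y ∈ l, p ≤ y) (x : String) :
    x ∈ adjGo prev l ↔ x ∈ l ∧ prev ≠ some x := by
  induction l generalizing prev with
  | nil => simp [adjGo]
  | cons a xs ih =>
      rcases List.pairwise_cons.1 hchain with ⟨ha, hxs⟩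
      by_cases h : prev = some a
      · have := ih prev hxs (fun p hp y hy => hprev p hp y (List.mem_cons_of_mem _ hy)) 
        simp only [adjGo, if_pos h, this]
        constructor
        · rintro ⟨hx, hne⟩; exact ⟨List.mem_cons_of_mem _ hx, hne⟩
        · rintro ⟨hx, hne⟩
          rcases List.mem_cons.1 hx with rfl | hx
          · exact absurd h hne
          · exact ⟨hx, hne⟩
      · have := ih (some a) hxs (by rintro p hp y hy; cases Option.some.inj hp; exact ha y hy)
        simp only [adjGo, if_neg h, List.mem_cons, this]
        constructor
        · rintro (rfl | ⟨hx, hne⟩)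
          · exact ⟨Or.inl rfl, fun hc => h hc⟩
          · refine ⟨Or.inr hx, ?_⟩
            rintro rfl
            have h1 : x ≤ a := hprev x rfl a (List.mem_cons_self ..)
            have h2 : a ≤ x := ha x hx
            exact (fun hc => hne (by rw [hc])) (le_antisymm h2 h1)
        · rintro ⟨rfl | hx, hne⟩
          · exact Or.inl rfl
          · by_cases hxa : x = a
            · exact Or.inl hxa
            · exact Or.inr ⟨hx, fun hc => hxa (Option.some.inj hc).symm⟩

lemma pairwise_adjGo (l : List String) (prev : Option String)
    (hchain : l.Pairwise (· ≤ ·))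
    (hprev : ∀ p, prev = some p → ∀ y ∈ l, p ≤ y) :
    (adjGo prev l).Pairwise (· < ·) := by
  induction l generalizing prev with
  | nil => simp [adjGo]
  | cons a xs ih =>
      rcases List.pairwise_cons.1 hchain with ⟨ha, hxs⟩
      by_cases h : prev = some a
      · simpa [adjGo, h] using ih prev hxs (fun p hp y hy => hprev p hp y (List.mem_cons_of_mem _ hy))
      · have hprev' : ∀ p, some a = some p → ∀ y ∈ xs, p ≤ y := by
          rintro p hp y hy; cases Option.some.inj hp; exact ha y hy
        simp only [adjGo, if_neg h]
        refine List.pairwise_cons.2 ⟨?_, ih (some a) hxs hprev'⟩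
        intro y hy
        rcases (mem_adjGo xs (some a) hxs hprev' y).1 hy with ⟨hyxs, hne⟩
        exact lt_of_le_of_ne (ha y hyxs) (fun hc => hne (by rw [hc]))

-- A's seen-dict loop: membership and nodup of the collected labels
lemma seen_fold_spec (l : List String) (d : PySem.Dict String Bool) (acc : List String)
    (hinv : ∀ x, d.contains x = true ↔ x ∈ acc) (hnd : acc.Nodup) :
    (∀ x, x ∈ (l.foldl pySeenStep (d, acc)).2 ↔
        x ∈ acc ∨ ∃ n ∈ l, PySem.Str.strip n ≠ "" ∧ x = PySem.Str.lower (PySem.Str.strip n)) ∧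
      (l.foldl pySeenStep (d, acc)).2.Nodup := by
  induction l generalizing d acc with
  | nil =>
      simp only [List.foldl_nil]
      exact ⟨fun x => by simp, hnd⟩
  | cons n xs ih =>
      by_cases hs : PySem.Str.strip n = ""
      · have := ih d acc hinv hnd
        simp only [List.foldl_cons, pySeenStep, if_pos hs]
        refine ⟨fun x => ?_, this.2⟩
        rw [this.1 x]
        constructor
        · rintro (hx | ⟨m, hm, hne, rfl⟩)
          · exact Or.inl hx
          · exact Or.inr ⟨m, List.mem_cons_of_mem _ hm, hne, rfl⟩
        · rintro (hx | ⟨m, hm, hne, rfl⟩)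
          · exact Or.inl hx
          · rcases List.mem_cons.1 hm with rfl | hm
            · exact absurd hs hne
            · exact Or.inr ⟨m, hm, hne, rfl⟩
      · by_cases hc : d.contains (PySem.Str.lower (PySem.Str.strip n)) = true
        · have hmem : PySem.Str.lower (PySem.Str.strip n) ∈ acc := (hinv _).1 hc
          have := ih d acc hinv hnd
          simp only [List.foldl_cons, pySeenStep, if_neg hs, hc, if_true]
          refine ⟨fun x => ?_, this.2⟩
          rw [this.1 x]
          constructor
          · rintro (hx | ⟨m, hm, hne, rfl⟩)
            · exact Or.inl hx
            · exact Or.inr ⟨m, List.mem_cons_of_mem _ hm, hne, rfl⟩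
          · rintro (hx | ⟨m, hm, hne, rfl⟩)
            · exact Or.inl hx
            · rcases List.mem_cons.1 hm with rfl | hm
              · exact Or.inl hmem
              · exact Or.inr ⟨m, hm, hne, rfl⟩
        · have hnmem : PySem.Str.lower (PySem.Str.strip n) ∉ acc := fun hm => hc ((hinv _).2 hm)
          have hinv' : ∀ x, (d.insert (PySem.Str.lower (PySem.Str.strip n)) true).contains x = true ↔
              x ∈ acc ++ [PySem.Str.lower (PySem.Str.strip n)] := by
            intro x
            rw [PySem.Dict.contains_insert]
            simp only [Bool.or_eq_true, beq_iff_eq, hinv x, List.mem_append,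
              List.mem_singleton]
            exact or_comm
          have hnd' : (acc ++ [PySem.Str.lower (PySem.Str.strip n)]).Nodup := by
            simp [List.nodup_append, hnd]
            intro a ha h
            exact hnmem (h ▸ ha)
          have := ih (d.insert (PySem.Str.lower (PySem.Str.strip n)) true)
            (acc ++ [PySem.Str.lower (PySem.Str.strip n)]) hinv' hnd'
          rw [Bool.not_eq_true] at hc
          simp only [List.foldl_cons, pySeenStep, if_neg hs, hc, Bool.false_eq_true,
            if_false]
          refine ⟨fun x => ?_, this.2⟩
          rw [this.1 x]
          simp only [List.mem_append, List.mem_singleton]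
          constructor
          · rintro ((hx | rfl) | ⟨m, hm, hne, rfl⟩)
            · exact Or.inl hx
            · exact Or.inr ⟨n, List.mem_cons_self .., hs, rfl⟩
            · exact Or.inr ⟨m, List.mem_cons_of_mem _ hm, hne, rfl⟩
          · rintro (hx | ⟨m, hm, hne, rfl⟩)
            · exact Or.inl (Or.inl hx)
            · rcases List.mem_cons.1 hm with rfl | hm
              · exact Or.inl (Or.inr rfl)
              · exact Or.inr ⟨m, hm, hne, rfl⟩

-- the central fact: A's dedup-then-sort equals B's sort-then-adjacent-dedup
lemma labels_eq (label_names : List String) :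
    PySem.List.sorted (label_names.foldl pySeenStep (PySem.Dict.empty, [])).2 (fun x => x) false
      = ((PySem.List.sorted (label_names.filterMap (fun name =>
            if PySem.Str.strip name = "" then none
            else some (PySem.Str.lower (PySem.Str.strip name)))) (fun x => x) false).foldl
          pyAdjStep (none, [])).2 := by
  set cands := label_names.filterMap (fun name =>
      if PySem.Str.strip name = "" then none
      else some (PySem.Str.lower (PySem.Str.strip name))) with hcands
  set s := PySem.List.sorted cands (fun x => x) false with hs
  have hchain : s.Pairwise (· ≤ ·) := PySem.List.sorted_pairwise cands (fun x => x)
  have hprev : ∀ p, (none : Option String) = some p → ∀ y ∈ s, p ≤ y := by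
    intro p hp; cases hp
  rw [foldl_adjStep, List.nil_append]
  have hmem_cands : ∀ x, x ∈ cands ↔
      ∃ n ∈ label_names, PySem.Str.strip n ≠ "" ∧ x = PySem.Str.lower (PySem.Str.strip n) := by
    intro x
    rw [hcands, List.mem_filterMap]
    constructor
    · rintro ⟨n, hn, hf⟩
      by_cases h : PySem.Str.strip n = ""
      · simp [h] at hf
      · simp only [h, if_false, Option.some.injEq] at hf
        exact ⟨n, hn, h, hf.symm⟩
    · rintro ⟨n, hn, hne, rfl⟩
      exact ⟨n, hn, by simp [hne]⟩
  have hA := seen_fold_spec label_names PySem.Dict.empty []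
    (by intro x; simp [PySem.Dict.contains_empty]) List.nodup_nil
  have hmemA : ∀ x, x ∈ (label_names.foldl pySeenStep (PySem.Dict.empty, [])).2 ↔ x ∈ cands := by
    intro x; rw [hA.1 x, hmem_cands]; simp
  have hys_pair : (adjGo none s).Pairwise (· < ·) := pairwise_adjGo s none hchain hprev
  have hys_mem : ∀ x, x ∈ adjGo none s ↔ x ∈ s := by
    intro x
    rw [mem_adjGo s none hchain hprev]
    simp
  have hys_nodup : (adjGo none s).Nodup := hys_pair.imp ne_of_lt
  have hperm : (adjGo none s).Perm (label_names.foldl pySeenStep (PySem.Dict.empty, [])).2 := by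
    apply (List.perm_ext_iff_of_nodup hys_nodup hA.2).2
    intro x
    rw [hys_mem x, hmemA x, hs, PySem.List.mem_sorted]
  exact PySem.List.sorted_eq_of_perm_of_pairwise_lt _ _ _ hperm hys_pair

-- ===== VERDICT (by name: the statement is the Claim_ definition above) =====
theorem normalize_issue_stripped_spec : Claim_equal_normalize_issue_stripped := by
  intro issue_id identifier title state_name raw_priority label_names blocker_ids
    blocker_identifiers blocker_states description branch_name url created_at updated_at _
  show _ = _
  unfold normalize_issue_stripped normalize_issue_stripped_alt
  simp only [pyOptionalText_eq_strip, labels_eq]
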